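-- pv_equiv track=rewrite | github.com/Erebus-Nyx/ai-companion | scripts/find_css_duplicates.py | find_similar_property_sets
-- ===== SOURCE A (Python) =====
-- from collections import defaultdict, Counter
--
-- def find_similar_property_sets(rules):
--     """Find rules with identical or very similar property sets"""
--     property_signatures = defaultdict(list)
--
--     for i, rule in enumerate(rules):
--         # Create a signature from sorted properties (ignoring values for now)
--         prop_names = tuple(sorted([prop[0] for prop in rule['properties']]))
--         if len(prop_names) > 0:  # Only consider rules with properties
--             property_signatures[prop_names].append(i)
--
--     similar_sets = {sig: indices for sig, indices in property_signatures.items()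
--                     if len(indices) > 1 and len(sig) > 2}  # At least 3 properties
--
--     return similar_sets
-- ===== SOURCE B (Python) =====
-- def find_similar_property_sets(rules):
--     """Find rules with identical or very similar property sets"""
--     sigs = [tuple(sorted(prop[0] for prop in rule['properties'])) for rule in rules]
--     result = {}
--     for j, sig in enumerate(sigs):
--         if len(sig) > 2 and sigs.index(sig) == j:
--             indices = [i for i, s in enumerate(sigs) if s == sig]
--             if len(indices) > 1:
--                 result[sig] = indices
--     return result
-- ===== Notes on version B (the rewrite author's own statement) =====
-- stated objective: alternative
-- what changed: Replaces the defaultdict hash-bucketing plus post-hoc dict comprehension by a precomputed signature list scanned directly: at each first occurrence of a >2-property signature (found via list.index) the indices are collected by a nested scan, so no intermediate dict of buckets is built.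
import Mathlib
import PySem

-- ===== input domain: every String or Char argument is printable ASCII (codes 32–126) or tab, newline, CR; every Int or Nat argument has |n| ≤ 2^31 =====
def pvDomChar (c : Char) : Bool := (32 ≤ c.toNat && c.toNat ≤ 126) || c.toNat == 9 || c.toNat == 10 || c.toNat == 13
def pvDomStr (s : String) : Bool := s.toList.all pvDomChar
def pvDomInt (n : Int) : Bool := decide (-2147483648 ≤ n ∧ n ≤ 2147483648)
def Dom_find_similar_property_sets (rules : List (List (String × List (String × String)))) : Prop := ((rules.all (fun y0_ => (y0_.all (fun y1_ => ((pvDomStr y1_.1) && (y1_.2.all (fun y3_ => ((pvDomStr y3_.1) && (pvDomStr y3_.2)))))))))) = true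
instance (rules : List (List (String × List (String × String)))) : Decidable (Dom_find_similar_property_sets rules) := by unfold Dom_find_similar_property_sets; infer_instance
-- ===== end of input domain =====

-- B replaces A's defaultdict hash-bucketing + dict comprehension by a precomputed signature list
-- scanned at first occurrences with a nested index-collecting scan (alternative decomposition, not faster).


-- rule['properties']: the rule dict's value at key "properties" (Pre_ guarantees the key is present,
-- so getD's default is never reached on admitted inputs); shared input decoding of both ports
def pvProps (rule : List (String × List (String × String))) : List (String × String) :=
  (PySem.Dict.ofList rule).getD "properties" []

-- ===== PORT A =====
def find_similar_property_sets (rules : List (List (String × List (String × String)))) : List (List String × List Int) :=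
  let property_signatures : PySem.Dict (List String) (List Int) :=
    (PySem.List.enumerate rules 0).foldl (fun d p =>
      let prop_names := PySem.List.sorted ((pvProps p.2).map (fun prop => prop.1)) (fun x => x) false
      if 0 < prop_names.length then d.modify prop_names [] (fun v => v ++ [p.1]) else d)
      PySem.Dict.empty
  property_signatures.items.filter (fun q => decide (1 < q.2.length) && decide (2 < q.1.length))

-- ===== PORT B =====
def find_similar_property_sets_alt (rules : List (List (String × List (String × String)))) : List (List String × List Int) :=
  let sigs := rules.map (fun rule => PySem.List.sorted ((pvProps rule).map (fun prop => prop.1)) (fun x => x) false)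
  (PySem.List.enumerate sigs 0).foldl (fun result p =>
    if decide (2 < p.2.length) && ((PySem.List.index? sigs p.2).map Int.ofNat == some p.1) then
      let indices := ((PySem.List.enumerate sigs 0).filter (fun q => q.2 == p.2)).map (fun q => q.1)
      if decide (1 < indices.length) then result ++ [(p.2, indices)] else result
    else result) []

-- ===== PRECONDITION & SPEC =====
-- Pre_ excludes exactly the inputs on which A raises KeyError: a rule dict without the key "properties".
def Pre_find_similar_property_sets (rules : List (List (String × List (String × String)))) : Prop :=
  ∀ rule ∈ rules, (PySem.Dict.ofList rule).contains "properties" = true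
instance (rules : List (List (String × List (String × String)))) : Decidable (Pre_find_similar_property_sets rules) := by unfold Pre_find_similar_property_sets; infer_instance
def pvWitness_find_similar_property_sets : (List (List (String × List (String × String)))) :=
  [[("properties", [("color", "red"), ("margin", "0"), ("padding", "1px")])],
   [("properties", [("padding", "2px"), ("margin", "4px"), ("color", "blue")])]]

def Spec_find_similar_property_sets (rules : List (List (String × List (String × String)))) (out : List (List String × List Int)) : Prop := out = find_similar_property_sets_alt rules
instance (rules : List (List (String × List (String × String)))) (out : List (List String × List Int)) : Decidable (Spec_find_similar_property_sets rules out) := by unfold Spec_find_similar_property_sets; infer_instance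

-- ===== CLAIM (what is proved, stated in full; the proofs are below) =====
def Claim_equal_find_similar_property_sets : Prop := ∀ (rules : List (List (String × List (String × String)))), Dom_find_similar_property_sets rules → Pre_find_similar_property_sets rules → Spec_find_similar_property_sets rules (find_similar_property_sets rules)

-- ===== LEMMAS AND PROOFS =====

-- proof-local abbreviations: the loop body of A's dict-building pass, the signature of one rule,
-- and the index list of one signature
def pvStep (d : PySem.Dict (List String) (List Int)) (q : Int × List String) : PySem.Dict (List String) (List Int) :=
  if 0 < q.2.length then d.modify q.2 [] (fun v => v ++ [q.1]) else d
def pvSig (rule : List (String × List (String × String))) : List String :=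
  PySem.List.sorted ((pvProps rule).map (fun prop => prop.1)) (fun x => x) false
def pvIdxs (sigs : List (List String)) (s : List String) : List Int :=
  ((PySem.List.enumerate sigs 0).filter (fun q => q.2 == s)).map (fun q => q.1)

lemma pv_enumerate_map {α β : Type} (f : α → β) (xs : List α) (s : Int) :
    PySem.List.enumerate (xs.map f) s = (PySem.List.enumerate xs s).map (fun p => (p.1, f p.2)) := by
  induction xs generalizing s with
  | nil => rfl
  | cons x xs ih => simp [PySem.List.enumerate_cons, ih]

lemma pv_filter_snd_map {α : Type} (P : α → Bool) (xs : List α) (s : Int) :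
    (((PySem.List.enumerate xs s).filter (fun p => P p.2)).map (fun p => p.2)) = xs.filter P := by
  induction xs generalizing s with
  | nil => rfl
  | cons x xs ih => by_cases h : P x = true <;> simp [PySem.List.enumerate_cons, h, ih]

lemma pv_map_snd_filter {α β : Type} (P : β → Bool) (Y : List (α × β)) :
    ((Y.filter (fun p => P p.2)).map (fun p => p.2)) = (Y.map (fun p => p.2)).filter P := by
  induction Y with
  | nil => rfl
  | cons y Y ih => by_cases h : P y.2 = true <;> simp [h, ih]

lemma pv_ofList_filter {α : Type} [BEq α] [LawfulBEq α] (P : α → Bool) (xs : List α) :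
    PySem.Set.ofList (xs.filter P) = (PySem.Set.ofList xs).filter P := by
  induction xs using List.reverseRecOn with
  | nil => rfl
  | append_singleton xs x ih =>
    by_cases h : P x = true
    · rw [List.filter_append, List.filter_cons]
      simp only [h, if_pos, List.filter_nil]
      rw [PySem.Set.ofList_append_singleton, PySem.Set.ofList_append_singleton,
        PySem.Set.add_eq_ite, PySem.Set.add_eq_ite]
      by_cases hm : x ∈ PySem.Set.ofList xs
      · simp [hm, ih, h]
      · simp [hm, ih, List.filter_append, h]
    · rw [List.filter_append, List.filter_cons]
      simp only [h, Bool.false_eq_true, List.filter_nil]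
      rw [PySem.Set.ofList_append_singleton, PySem.Set.add_eq_ite]
      by_cases hm : x ∈ PySem.Set.ofList xs
      · simp [hm, ih]
      · simp [hm, ih, List.filter_append, h]

-- the first-occurrence positions of a list, in order, carry exactly its distinct elements
lemma pv_firstOcc {α : Type} [BEq α] [LawfulBEq α] (xs : List α) :
    (((PySem.List.enumerate xs 0).filter
        (fun p => (PySem.List.index? xs p.2).map Int.ofNat == some p.1)).map (fun p => p.2))
      = PySem.Set.ofList xs := by
  induction xs using List.reverseRecOn with
  | nil => rfl
  | append_singleton xs x ih =>
    rw [PySem.List.enumerate_append, List.filter_append, List.map_append,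
      PySem.Set.ofList_append_singleton, PySem.Set.add_eq_ite]
    have hpref : (PySem.List.enumerate xs 0).filter
        (fun p => (PySem.List.index? (xs ++ [x]) p.2).map Int.ofNat == some p.1)
      = (PySem.List.enumerate xs 0).filter
        (fun p => (PySem.List.index? xs p.2).map Int.ofNat == some p.1) := by
      apply List.filter_congr
      intro p hp
      have hmem : p.2 ∈ xs := by
        rcases (PySem.List.mem_enumerate_iff xs 0 p).1 hp with ⟨k, hk, rfl⟩
        exact List.getElem_mem hk
      rw [PySem.List.index?_append_of_mem _ hmem]
    rw [hpref, ih]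
    by_cases hm : x ∈ PySem.Set.ofList xs
    · have hx : x ∈ xs := by rwa [PySem.Set.mem_ofList] at hm
      rcases Option.isSome_iff_exists.1 ((PySem.List.index?_isSome_iff xs x).2 hx) with ⟨k, hk⟩
      have hkx : PySem.List.index? (xs ++ [x]) x = some k := by
        rw [PySem.List.index?_append_of_mem _ hx]; exact hk
      rcases PySem.List.getElem_of_index?_eq_some hk with ⟨hklt, -, -⟩
      have hne : ((PySem.List.index? (xs ++ [x]) x).map Int.ofNat == some ((0 : Int) + xs.length)) = false := by
        rw [hkx]
        simp only [Option.map_some, beq_eq_false_iff_ne, ne_eq, Option.some.injEq,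
          Int.ofNat_eq_natCast]
        omega
      have henum : PySem.List.enumerate [x] ((0:Int) + ↑xs.length) = [(((0:Int) + ↑xs.length), x)] := by
        rw [PySem.List.enumerate_cons]; rfl
      rw [henum, List.filter_cons]
      simp only [hne, Bool.false_eq_true, if_false, List.filter_nil, List.map_nil, List.append_nil]
      rw [if_pos hm]
    · have hx : x ∉ xs := by rwa [PySem.Set.mem_ofList] at hm
      have hkx := PySem.List.index?_append_singleton_self xs x hx
      have hT : ((PySem.List.index? (xs ++ [x]) x).map Int.ofNat == some ((0 : Int) + xs.length)) = true := by
        rw [hkx]; simp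
      have henum : PySem.List.enumerate [x] ((0:Int) + ↑xs.length) = [(((0:Int) + ↑xs.length), x)] := by
        rw [PySem.List.enumerate_cons]; rfl
      rw [henum, List.filter_cons]
      simp only [hT, if_true, List.filter_nil, List.map_cons, List.map_nil]
      rw [if_neg hm]

lemma pv_keys_add (d : PySem.Dict (List String) (List Int)) (k : List String) (f : List Int → List Int) :
    (d.modify k [] f).keys = PySem.Set.add d.keys k := by
  rw [PySem.Dict.keys_modify, PySem.Set.add_eq_ite]
  by_cases h : k ∈ d.keys
  · rw [PySem.Dict.keys_insert_of_contains _ _ ((PySem.Dict.contains_iff_mem_keys _ _).2 h), if_pos h]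
  · have hc : d.contains k = false := by
      by_contra hc
      simp only [Bool.not_eq_false] at hc
      exact h ((PySem.Dict.contains_iff_mem_keys _ _).1 hc)
    rw [PySem.Dict.keys_insert_of_not_contains _ _ hc, if_neg h]

lemma pv_dict_keys (l : List (Int × List String)) (d : PySem.Dict (List String) (List Int)) :
    (l.foldl pvStep d).keys
      = PySem.Set.update d.keys ((l.filter (fun q => decide (0 < q.2.length))).map (fun q => q.2)) := by
  induction l generalizing d with
  | nil => rfl
  | cons q l ih =>
    rw [List.foldl_cons, List.filter_cons]
    by_cases h : 0 < q.2.length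
    · rw [if_pos (by simpa using h)]
      simp only [List.map_cons, PySem.Set.update_cons, ih, pvStep, if_pos h, pv_keys_add]
    · rw [if_neg (by simpa using h)]
      simp only [ih, pvStep, if_neg h]

lemma pv_dict_getD (l : List (Int × List String)) (d : PySem.Dict (List String) (List Int)) (c : List String) :
    (l.foldl pvStep d).getD c []
      = d.getD c [] ++ (l.filter (fun q => decide (0 < q.2.length) && (q.2 == c))).map (fun q => q.1) := by
  induction l generalizing d with
  | nil => simp
  | cons q l ih =>
    rw [List.foldl_cons, List.filter_cons]
    by_cases h : 0 < q.2.length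
    · by_cases hc : q.2 = c
      · subst hc
        simp only [decide_eq_true h, BEq.rfl, Bool.and_self]
        rw [show pvStep d q = d.modify q.2 [] (fun v => v ++ [q.1]) from if_pos h, ih,
          PySem.Dict.getD_modify]
        simp
      · have hff : (decide (0 < q.2.length) && (q.2 == c)) = false := by simp [hc]
        rw [hff]
        simp only [Bool.false_eq_true, if_false]
        rw [show pvStep d q = d.modify q.2 [] (fun v => v ++ [q.1]) from if_pos h, ih,
          PySem.Dict.getD_modify, if_neg (fun hh => hc hh.symm)]
    · have hff : (decide (0 < q.2.length) && (q.2 == c)) = false := by simp [h]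
      rw [hff]
      simp only [Bool.false_eq_true, if_false]
      rw [show pvStep d q = d from if_neg h, ih]

-- A's inline signature computation, rephrased as a fold over the signature list
lemma pv_A_fold (rules : List (List (String × List (String × String)))) :
    (PySem.List.enumerate rules 0).foldl (fun d p =>
        let prop_names := PySem.List.sorted ((pvProps p.2).map (fun prop => prop.1)) (fun x => x) false
        if 0 < prop_names.length then d.modify prop_names [] (fun v => v ++ [p.1]) else d)
      PySem.Dict.empty
    = (PySem.List.enumerate (rules.map pvSig) 0).foldl pvStep PySem.Dict.empty := by
  rw [pv_enumerate_map, List.foldl_map]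
  rfl

-- A's result: the distinct nonempty signatures in first-occurrence order, each with all its
-- rule indices, filtered by A's two thresholds
lemma pv_A_char (rules : List (List (String × List (String × String)))) :
    find_similar_property_sets rules
      = ((PySem.Set.ofList ((rules.map pvSig).filter (fun s => decide (0 < s.length)))).map
          (fun s => (s, ((PySem.List.enumerate (rules.map pvSig) 0).filter
              (fun q => decide (0 < q.2.length) && (q.2 == s))).map (fun q => q.1)))).filter
            (fun q => decide (1 < q.2.length) && decide (2 < q.1.length)) := by
  simp only [find_similar_property_sets, pv_A_fold]
  have hnodup : ((PySem.List.enumerate (rules.map pvSig) 0).foldl pvStep PySem.Dict.empty).keys.Nodup := by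
    rw [pv_dict_keys, PySem.Dict.keys_empty, PySem.Set.update_nil_left]
    exact PySem.Set.nodup_ofList _
  rw [PySem.Dict.items_eq_map_keys _ hnodup []]
  rw [pv_dict_keys, PySem.Dict.keys_empty, PySem.Set.update_nil_left,
    pv_filter_snd_map (fun (s : List String) => decide (0 < s.length))]
  congr 1
  apply List.map_congr_left
  intro s _
  rw [pv_dict_getD, PySem.Dict.getD_empty, List.nil_append]

-- B's loop: the first occurrences of >2-property signatures, each with its collected indices
lemma pv_B_loop (sigs : List (List String)) :
    (PySem.List.enumerate sigs 0).foldl (fun result p =>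
      if decide (2 < p.2.length) && ((PySem.List.index? sigs p.2).map Int.ofNat == some p.1) then
        let indices := ((PySem.List.enumerate sigs 0).filter (fun q => q.2 == p.2)).map (fun q => q.1)
        if decide (1 < indices.length) then result ++ [(p.2, indices)] else result
      else result) []
    = ((PySem.Set.ofList sigs).filter
        (fun s => decide (2 < s.length) && decide (1 < (pvIdxs sigs s).length))).map
        (fun s => (s, pvIdxs sigs s)) := by
  rw [PySem.List.foldl_congr_mem _ _
    (fun (result : List (List String × List Int)) (p : Int × List String) =>
      if ((decide (2 < p.2.length) && decide (1 < (pvIdxs sigs p.2).length)) &&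
          ((PySem.List.index? sigs p.2).map Int.ofNat == some p.1)) then
        result ++ [(p.2, pvIdxs sigs p.2)] else result) _ ?_]
  · rw [PySem.List.foldl_append_if
      (fun (p : Int × List String) =>
        ((decide (2 < p.2.length) && decide (1 < (pvIdxs sigs p.2).length)) &&
          ((PySem.List.index? sigs p.2).map Int.ofNat == some p.1)))
      (fun (p : Int × List String) => (p.2, pvIdxs sigs p.2))]
    rw [List.nil_append, ← List.filter_filter]
    have h1 : ∀ (Y : List (Int × List String)),
        Y.map (fun p => (p.2, pvIdxs sigs p.2))
          = (Y.map (fun p => p.2)).map (fun s => (s, pvIdxs sigs s)) := by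
      intro Y; rw [List.map_map]; rfl
    rw [h1, pv_map_snd_filter
        (fun (s : List String) => decide (2 < s.length) && decide (1 < (pvIdxs sigs s).length)),
      pv_firstOcc]
  · intro acc p _
    simp only [pvIdxs]
    by_cases ha : 2 < p.2.length
    · by_cases hb : ((PySem.List.index? sigs p.2).map Int.ofNat == some p.1) = true
      · by_cases h2 : 1 < (((PySem.List.enumerate sigs 0).filter (fun q => q.2 == p.2)).map (fun q => q.1)).length
        · simp only [decide_eq_true ha, hb, Bool.and_true, Bool.true_and, if_true]
          rw [if_pos (by simpa using h2), if_pos (by simpa using h2)]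
        · simp only [decide_eq_true ha, hb, Bool.and_true, Bool.true_and, if_true]
          rw [if_neg (by simpa using h2), if_neg (by simpa using h2)]
      · simp only [Bool.not_eq_true] at hb
        simp only [decide_eq_true ha, hb, Bool.and_false, Bool.true_and, Bool.false_eq_true,
          if_false]
    · simp only [decide_eq_false ha, Bool.false_and, Bool.false_eq_true, if_false]

-- the zero-length guard inside A's per-signature index list is redundant for a nonempty signature
lemma pv_gd (sigs : List (List String)) (s : List String) (hs : 0 < s.length) :
    (((PySem.List.enumerate sigs 0).filter
        (fun q => decide (0 < q.2.length) && (q.2 == s))).map (fun q => q.1)) = pvIdxs sigs s := by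
  unfold pvIdxs
  congr 1
  apply List.filter_congr
  intro q _
  by_cases h : (q.2 == s) = true
  · have hq : q.2 = s := by simpa using h
    simp [hq, hs]
  · simp [h]

lemma pv_AB (rules : List (List (String × List (String × String)))) :
    find_similar_property_sets rules = find_similar_property_sets_alt rules := by
  have hB : find_similar_property_sets_alt rules
      = ((PySem.Set.ofList (rules.map pvSig)).filter
          (fun s => decide (2 < s.length) && decide (1 < (pvIdxs (rules.map pvSig) s).length))).map
          (fun s => (s, pvIdxs (rules.map pvSig) s)) := pv_B_loop (rules.map pvSig)
  rw [pv_A_char, hB, List.filter_map, pv_ofList_filter, List.filter_filter]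
  have hcond : List.filter
      (fun s => ((fun q => decide (1 < q.2.length) && decide (2 < q.1.length)) ∘
          (fun s => (s, ((PySem.List.enumerate (rules.map pvSig) 0).filter
            (fun q => decide (0 < q.2.length) && (q.2 == s))).map (fun q => q.1)))) s
        && decide (0 < s.length))
      (PySem.Set.ofList (rules.map pvSig))
    = List.filter
      (fun s => decide (2 < s.length) && decide (1 < (pvIdxs (rules.map pvSig) s).length))
      (PySem.Set.ofList (rules.map pvSig)) := by
    apply List.filter_congr
    intro s _
    by_cases h2 : 2 < s.length
    · have h0 : 0 < s.length := by omega
      simp only [Function.comp_apply, pv_gd _ s h0, decide_eq_true h2, decide_eq_true h0,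
        Bool.and_true, Bool.true_and]
    · simp only [Function.comp_apply, decide_eq_false h2, Bool.and_false, Bool.false_and]
  rw [hcond]
  apply List.map_congr_left
  intro s hs
  rw [List.mem_filter] at hs
  have h2 : 2 < s.length := by
    rcases hs with ⟨-, hq⟩
    simp only [Bool.and_eq_true, decide_eq_true_eq] at hq
    exact hq.1
  rw [pv_gd _ s (by omega)]

-- ===== VERDICT (by name: the statement is the Claim_ definition above) =====
theorem find_similar_property_sets_spec : Claim_equal_find_similar_property_sets := by
  intro rules _ _
  unfold Spec_find_similar_property_sets
  exact pv_AB rules
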